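-- pv_equiv track=rewrite | github.com/decisionMe/dme_admin | services/magic_link_service.py | validate_magic_token_format
-- ===== SOURCE A (Python) =====
-- def validate_magic_token_format(token: str) -> bool:
--     """
--     Validate that a magic token has the correct format
--
--     Args:
--         token: The magic token to validate
--
--     Returns:
--         True if format is valid, False otherwise
--     """
--     try:
--         # Token should have format: {random_token}.{hmac_signature}
--         parts = token.split('.')
--         if len(parts) != 2:
--             return False
--
--         random_part, signature_part = parts
--
--         # Random part should be 64 hex characters (32 bytes)
--         if len(random_part) != 64 or not all(c in '0123456789abcdef' for c in random_part.lower()):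
--             return False
--
--         # Signature part should be 64 hex characters (SHA256 = 32 bytes = 64 hex)
--         if len(signature_part) != 64 or not all(c in '0123456789abcdef' for c in signature_part.lower()):
--             return False
--
--         return True
--
--     except Exception:
--         return False
-- ===== SOURCE B (Python) =====
-- _HEX = set('0123456789abcdefABCDEF')
--
--
-- def validate_magic_token_format(token: str) -> bool:
--     # Fixed-shape positional check: 64 hex chars, a dot at index 64, 64 hex chars.
--     if len(token) != 129 or token[64] != '.':
--         return False
--     return all(c in _HEX for c in token[:64]) and all(c in _HEX for c in token[65:])
-- ===== Notes on version B (the rewrite author's own statement) =====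
-- stated objective: simpler
-- what changed: B drops A's split-on-dot plus per-part lowercase-then-check loops and instead validates the fixed shape positionally: length 129, a dot at index 64, and case-insensitive hex membership on the two 64-character slices.
import Mathlib
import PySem

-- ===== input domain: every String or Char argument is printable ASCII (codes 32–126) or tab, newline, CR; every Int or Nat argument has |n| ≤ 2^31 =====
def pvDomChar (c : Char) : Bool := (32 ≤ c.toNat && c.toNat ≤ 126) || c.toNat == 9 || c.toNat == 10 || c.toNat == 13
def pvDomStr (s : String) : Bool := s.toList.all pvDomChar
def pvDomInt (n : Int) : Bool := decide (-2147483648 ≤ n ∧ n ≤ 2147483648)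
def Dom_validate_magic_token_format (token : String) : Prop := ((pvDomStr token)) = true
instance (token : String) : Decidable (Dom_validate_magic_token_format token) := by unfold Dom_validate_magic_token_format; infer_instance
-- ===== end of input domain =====

-- B replaces A's split-on-dot + per-part lowercase-hex loops by one fixed-shape positional
-- check (length 129, '.' at index 64, case-insensitive hex on the two slices); objective: simpler.

-- ===== PORT A =====
-- the hex alphabet literal A compares lowercased characters against
def pvHexLower : List Char := "0123456789abcdef".toList

def validate_magic_token_format (token : String) : Bool :=
  -- parts = token.split('.')
  let parts := PySem.Chars.splitOn token.toList ".".toList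
  if parts.length != 2 then false
  else
    match parts with
    | [random_part, signature_part] =>
      if random_part.length != 64
          || !((PySem.Chars.lower random_part).all (fun c => pvHexLower.contains c)) then false
      else if signature_part.length != 64
          || !((PySem.Chars.lower signature_part).all (fun c => pvHexLower.contains c)) then false
      else true
    | _ => false

-- ===== PORT B =====
-- the case-insensitive hex alphabet literal B compares characters against
def pvHexAny : List Char := "0123456789abcdefABCDEF".toList

def validate_magic_token_format_alt (token : String) : Bool :=
  let cs := token.toList
  -- if len(token) != 129 or token[64] != '.': return False
  if cs.length != 129 || PySem.List.pyGet? cs 64 != some '.' then false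
  else
    -- all(c in _HEX for c in token[:64]) and all(c in _HEX for c in token[65:])
    (PySem.List.slice cs none (some 64)).all (fun c => pvHexAny.contains c)
      && (PySem.List.slice cs (some 65) none).all (fun c => pvHexAny.contains c)

-- ===== PRECONDITION & SPEC =====
def Spec_validate_magic_token_format (token : String) (out : Bool) : Prop := out = validate_magic_token_format_alt token
instance (token : String) (out : Bool) : Decidable (Spec_validate_magic_token_format token out) := by unfold Spec_validate_magic_token_format; infer_instance

-- ===== CLAIM (what is proved, stated in full; the proofs are below) =====
def Claim_equal_validate_magic_token_format : Prop := ∀ (token : String), Dom_validate_magic_token_format token → Spec_validate_magic_token_format token (validate_magic_token_format token)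

-- ===== LEMMAS AND PROOFS =====

-- characters: equalities and comparisons move to code points
lemma char_eq_iff_toNat (c d : Char) : (c = d) ↔ c.toNat = d.toNat := by
  constructor
  · intro h; subst h; rfl
  · intro h; exact Char.ext (UInt32.toNat_inj.mp h)

lemma char_le_iff (c d : Char) : (c ≤ d) ↔ c.toNat ≤ d.toNat := by
  constructor
  · intro h; exact UInt32.le_iff_toNat_le.mp h
  · intro h; exact UInt32.le_iff_toNat_le.mpr h

lemma mem_pvHexLower_iff (c : Char) : c ∈ pvHexLower ↔
    (48 ≤ c.toNat ∧ c.toNat ≤ 57) ∨ (97 ≤ c.toNat ∧ c.toNat ≤ 102) := by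
  have h : pvHexLower = ['0','1','2','3','4','5','6','7','8','9','a','b','c','d','e','f'] := rfl
  rw [h]
  simp only [List.mem_cons, List.not_mem_nil, or_false, char_eq_iff_toNat,
    show ('0':Char).toNat = 48 from rfl, show ('1':Char).toNat = 49 from rfl,
    show ('2':Char).toNat = 50 from rfl, show ('3':Char).toNat = 51 from rfl,
    show ('4':Char).toNat = 52 from rfl, show ('5':Char).toNat = 53 from rfl,
    show ('6':Char).toNat = 54 from rfl, show ('7':Char).toNat = 55 from rfl,
    show ('8':Char).toNat = 56 from rfl, show ('9':Char).toNat = 57 from rfl,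
    show ('a':Char).toNat = 97 from rfl, show ('b':Char).toNat = 98 from rfl,
    show ('c':Char).toNat = 99 from rfl, show ('d':Char).toNat = 100 from rfl,
    show ('e':Char).toNat = 101 from rfl, show ('f':Char).toNat = 102 from rfl]
  omega

lemma mem_pvHexAny_iff (c : Char) : c ∈ pvHexAny ↔
    (48 ≤ c.toNat ∧ c.toNat ≤ 57) ∨ (97 ≤ c.toNat ∧ c.toNat ≤ 102) ∨ (65 ≤ c.toNat ∧ c.toNat ≤ 70) := by
  have h : pvHexAny = ['0','1','2','3','4','5','6','7','8','9','a','b','c','d','e','f','A','B','C','D','E','F'] := rfl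
  rw [h]
  simp only [List.mem_cons, List.not_mem_nil, or_false, char_eq_iff_toNat,
    show ('0':Char).toNat = 48 from rfl, show ('1':Char).toNat = 49 from rfl,
    show ('2':Char).toNat = 50 from rfl, show ('3':Char).toNat = 51 from rfl,
    show ('4':Char).toNat = 52 from rfl, show ('5':Char).toNat = 53 from rfl,
    show ('6':Char).toNat = 54 from rfl, show ('7':Char).toNat = 55 from rfl,
    show ('8':Char).toNat = 56 from rfl, show ('9':Char).toNat = 57 from rfl,
    show ('a':Char).toNat = 97 from rfl, show ('b':Char).toNat = 98 from rfl,
    show ('c':Char).toNat = 99 from rfl, show ('d':Char).toNat = 100 from rfl,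
    show ('e':Char).toNat = 101 from rfl, show ('f':Char).toNat = 102 from rfl,
    show ('A':Char).toNat = 65 from rfl, show ('B':Char).toNat = 66 from rfl,
    show ('C':Char).toNat = 67 from rfl, show ('D':Char).toNat = 68 from rfl,
    show ('E':Char).toNat = 69 from rfl, show ('F':Char).toNat = 70 from rfl]
  omega

lemma lowerChar_toNat (c : Char) : (PySem.Chars.lowerChar c).toNat =
    if 65 ≤ c.toNat ∧ c.toNat ≤ 90 then c.toNat + 32 else c.toNat := by
  unfold PySem.Chars.lowerChar PySem.Chars.isupper
  have hA : ('A' ≤ c) ↔ 65 ≤ c.toNat := char_le_iff 'A' c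
  have hZ : (c ≤ 'Z') ↔ c.toNat ≤ 90 := char_le_iff c 'Z'
  by_cases h : 65 ≤ c.toNat ∧ c.toNat ≤ 90
  · simp only [hA.mpr h.1, hZ.mpr h.2, decide_true, Bool.and_self, if_true, h]
    rw [Char.toNat_ofNat]
    have hv : (c.toNat + 32).isValidChar := Or.inl (by omega)
    simp [hv]
  · simp only [h, if_false]
    rcases Decidable.not_and_iff_or_not.mp h with h1 | h1
    · simp [hA, h1]
    · simp [hZ, h1]

-- A checks the LOWERCASED character against lowercase hex; B the raw character against either case
lemma lower_hex_char (c : Char) :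
    PySem.Chars.lowerChar c ∈ pvHexLower ↔ c ∈ pvHexAny := by
  rw [mem_pvHexLower_iff, mem_pvHexAny_iff, lowerChar_toNat]
  split_ifs with h <;> omega

lemma all_lower_hex (l : List Char) :
    (∀ c ∈ PySem.Chars.lower l, c ∈ pvHexLower) ↔ (∀ c ∈ l, c ∈ pvHexAny) := by
  unfold PySem.Chars.lower
  constructor
  · intro h c hc
    exact (lower_hex_char c).mp (h _ (List.mem_map_of_mem hc))
  · intro h x hx
    obtain ⟨c, hc, rfl⟩ := List.mem_map.mp hx
    exact (lower_hex_char c).mpr (h c hc)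

-- ---- token.split('.') as a simple structural recursion ----
def pvConsHead (pre : List Char) : List (List Char) → List (List Char)
  | [] => [pre]
  | h :: t => (pre ++ h) :: t

def pvSplitDot : List Char → List (List Char)
  | [] => [[]]
  | c :: rest => if c = '.' then [] :: pvSplitDot rest else pvConsHead [c] (pvSplitDot rest)

lemma pvSplitDot_ne_nil (l : List Char) : pvSplitDot l ≠ [] := by
  induction l with
  | nil => simp [pvSplitDot]
  | cons c rest ih =>
    unfold pvSplitDot
    split
    · simp
    · cases h : pvSplitDot rest with
      | nil => exact absurd h ih
      | cons a t => simp [pvConsHead]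

lemma pvConsHead_consHead (a b : List Char) (l : List (List Char)) :
    pvConsHead a (pvConsHead b l) = pvConsHead (a ++ b) l := by
  cases l <;> simp [pvConsHead]

lemma pvGo_eq (fuel : Nat) (l cur : List Char) (acc : List (List Char)) (h : l.length < fuel) :
    PySem.Chars.splitOn.go ['.'] fuel l cur acc = acc.reverse ++ pvConsHead cur.reverse (pvSplitDot l) := by
  induction fuel generalizing l cur acc with
  | zero => omega
  | succ fuel ih =>
    cases l with
    | nil =>
      simp [PySem.Chars.splitOn.go, pvSplitDot, pvConsHead]
    | cons c rest =>
      rw [PySem.Chars.splitOn.go]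
      by_cases hc : c = '.'
      · subst hc
        have hp : List.isPrefixOf ['.'] ('.' :: rest) = true := by simp [List.isPrefixOf]
        simp only [hp, if_true, List.length_cons, List.drop_succ_cons, List.length_nil, List.drop_zero]
        rw [ih rest [] (cur.reverse :: acc) (by simpa using Nat.lt_of_succ_lt_succ h)]
        cases hs : pvSplitDot rest with
        | nil => exact absurd hs (pvSplitDot_ne_nil rest)
        | cons a t =>
          simp [pvSplitDot, hs, pvConsHead]
      · have hp : List.isPrefixOf ['.'] (c :: rest) = false := by
          simp [List.isPrefixOf]; exact fun hh => absurd hh.symm hc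
        simp only [hp]
        rw [ih rest (c :: cur) acc (by simpa using Nat.lt_of_succ_lt_succ h)]
        simp [pvSplitDot, hc, pvConsHead_consHead]

lemma pvSplitOn_eq (l : List Char) : PySem.Chars.splitOn l ['.'] = pvSplitDot l := by
  unfold PySem.Chars.splitOn
  rw [pvGo_eq (l.length + 1) l [] [] (Nat.lt_succ_self _)]
  cases hs : pvSplitDot l with
  | nil => exact absurd hs (pvSplitDot_ne_nil l)
  | cons a t => simp [pvConsHead]

lemma pvSplitDot_singleton (l x : List Char) :
    pvSplitDot l = [x] ↔ (l = x ∧ '.' ∉ x) := by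
  induction l generalizing x with
  | nil =>
    constructor
    · intro h
      simp only [pvSplitDot] at h
      have : x = [] := by simpa using h.symm
      simp [this]
    · intro ⟨h1, _⟩; simp [pvSplitDot, ← h1]
  | cons c rest ih =>
    unfold pvSplitDot
    by_cases hc : c = '.'
    · subst hc
      simp only [if_true]
      constructor
      · intro h
        have h2 : pvSplitDot rest = [] := by
          have := List.cons_eq_cons.mp h
          simpa using this.2
        exact absurd h2 (pvSplitDot_ne_nil rest)
      · intro ⟨h1, h2⟩
        exact absurd (h1 ▸ List.mem_cons_self) h2
    · rw [if_neg hc]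
      cases h' : pvSplitDot rest with
      | nil => exact absurd h' (pvSplitDot_ne_nil rest)
      | cons a t =>
        simp only [pvConsHead, List.cons_append, List.nil_append]
        constructor
        · intro h
          obtain ⟨hx, ht⟩ := List.cons_eq_cons.mp h
          have hr := (ih a).mp (by rw [h', ht])
          refine ⟨by rw [← hx, hr.1], ?_⟩
          rw [← hx]
          simp only [List.mem_cons]
          rintro (h1 | h1)
          · exact hc h1.symm
          · exact hr.2 h1
        · rintro ⟨h1, h2⟩
          cases x with
          | nil => simp at h1
          | cons x0 xr =>
            obtain ⟨hx0, hxr⟩ := List.cons_eq_cons.mp h1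
            have h2r : '.' ∉ xr := fun hm => h2 (List.mem_cons_of_mem _ hm)
            have := (ih xr).mpr ⟨hxr, h2r⟩
            rw [h'] at this
            obtain ⟨ha, ht⟩ := List.cons_eq_cons.mp this
            simp [hx0, ha, ht]

lemma pvSplitDot_pair (l r s : List Char) :
    pvSplitDot l = [r, s] ↔ (l = r ++ '.' :: s ∧ '.' ∉ r ∧ '.' ∉ s) := by
  induction l generalizing r with
  | nil =>
    constructor
    · intro h; simp [pvSplitDot] at h
    · intro ⟨h1, _⟩; simp at h1
  | cons c rest ih =>
    unfold pvSplitDot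
    by_cases hc : c = '.'
    · subst hc
      simp only [if_true]
      constructor
      · intro h
        obtain ⟨hr, hs⟩ := List.cons_eq_cons.mp h
        have := (pvSplitDot_singleton rest s).mp hs
        exact ⟨by simp [← hr, this.1], by simp [← hr], this.2⟩
      · rintro ⟨h1, h2, h3⟩
        cases r with
        | nil =>
          simp only [List.nil_append, List.cons_eq_cons] at h1
          simp [(pvSplitDot_singleton rest s).mpr ⟨h1.2, h3⟩]
        | cons r0 rr =>
          obtain ⟨hr0, _⟩ := List.cons_eq_cons.mp h1
          exact absurd (hr0 ▸ List.mem_cons_self) h2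
    · rw [if_neg hc]
      cases h' : pvSplitDot rest with
      | nil => exact absurd h' (pvSplitDot_ne_nil rest)
      | cons a t =>
        simp only [pvConsHead, List.cons_append, List.nil_append]
        constructor
        · intro h
          obtain ⟨hr, ht⟩ := List.cons_eq_cons.mp h
          have hrec := (ih a).mp (by rw [h', ht])
          refine ⟨by rw [← hr]; simpa using hrec.1, ?_, hrec.2.2⟩
          rw [← hr]
          simp only [List.mem_cons]
          rintro (h1 | h1)
          · exact hc h1.symm
          · exact hrec.2.1 h1
        · rintro ⟨h1, h2, h3⟩
          cases r with
          | nil =>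
            simp only [List.nil_append, List.cons_eq_cons] at h1
            exact absurd h1.1 hc
          | cons r0 rr =>
            simp only [List.cons_append, List.cons_eq_cons] at h1
            have h2r : '.' ∉ rr := fun hm => h2 (List.mem_cons_of_mem _ hm)
            have := (ih rr).mpr ⟨h1.2, h2r, h3⟩
            rw [h'] at this
            obtain ⟨ha, ht⟩ := List.cons_eq_cons.mp this
            simp [h1.1, ha, ht]

-- the common shape both programs accept
def pvMid (cs : List Char) : Prop :=
  ∃ r s, cs = r ++ '.' :: s ∧ r.length = 64 ∧ s.length = 64 ∧
    (∀ c ∈ r, c ∈ pvHexAny) ∧ (∀ c ∈ s, c ∈ pvHexAny)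

lemma no_dot_of_all_hex (l : List Char) (h : ∀ c ∈ l, c ∈ pvHexAny) : '.' ∉ l := by
  intro hm
  have := (mem_pvHexAny_iff '.').mp (h '.' hm)
  simp [show ('.':Char).toNat = 46 from rfl] at this

lemma A_eq_true_iff (token : String) :
    validate_magic_token_format token = true ↔ pvMid token.toList := by
  unfold validate_magic_token_format
  rw [show (".".toList) = ['.'] from rfl, pvSplitOn_eq]
  constructor
  · intro h
    cases hp : pvSplitDot token.toList with
    | nil => exact absurd hp (pvSplitDot_ne_nil _)
    | cons r t =>
      cases t with
      | nil => simp [hp] at h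
      | cons s t2 =>
        cases t2 with
        | cons _ _ => simp [hp] at h
        | nil =>
          simp only [hp, List.length_cons, List.length_nil] at h
          have hpair := (pvSplitDot_pair token.toList r s).mp hp
          by_cases h1 : r.length = 64
          · by_cases h2 : ∀ c ∈ PySem.Chars.lower r, c ∈ pvHexLower
            · by_cases h3 : s.length = 64
              · by_cases h4 : ∀ c ∈ PySem.Chars.lower s, c ∈ pvHexLower
                · exact ⟨r, s, hpair.1, h1, h3,
                    (all_lower_hex r).mp h2, (all_lower_hex s).mp h4⟩
                · simp [h1, h3, h4] at h
              · simp [h1, h3] at h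
            · simp [h2] at h
          · simp [h1] at h
  · rintro ⟨r, s, hcs, h1, h2, h3, h4⟩
    have hp : pvSplitDot token.toList = [r, s] :=
      (pvSplitDot_pair token.toList r s).mpr ⟨hcs, no_dot_of_all_hex r h3, no_dot_of_all_hex s h4⟩
    have h3' := (all_lower_hex r).mpr h3
    have h4' := (all_lower_hex s).mpr h4
    simp [hp, h1, h2]
    exact ⟨h3', h4'⟩

-- B's fixed-position shape, stated over take/drop
lemma pvMid_iff_shape (cs : List Char) :
    pvMid cs ↔ (cs.length = 129 ∧ cs[64]? = some '.' ∧
      (∀ c ∈ cs.take 64, c ∈ pvHexAny) ∧ (∀ c ∈ cs.drop 65, c ∈ pvHexAny)) := by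
  constructor
  · rintro ⟨r, s, rfl, h1, h2, h3, h4⟩
    refine ⟨by simp [h1, h2], ?_, ?_, ?_⟩
    · rw [List.getElem?_append_right (by omega)]
      simp [h1]
    · rw [show (64 : Nat) = r.length from h1.symm, List.take_left]
      exact h3
    · have hd : (r ++ '.' :: s).drop (r.length + 1) = s := by simp [List.drop_append]
      rw [show (65 : Nat) = r.length + 1 from by omega, hd]
      exact h4
  · rintro ⟨h1, h2, h3, h4⟩
    obtain ⟨hlt, hget⟩ := List.getElem?_eq_some_iff.mp h2
    refine ⟨cs.take 64, cs.drop 65, ?_, by simp [h1], by simp [h1], h3, h4⟩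
    conv_lhs => rw [← List.take_append_drop 64 cs]
    rw [List.drop_eq_getElem_cons hlt, hget]

lemma B_eq_true_iff (token : String) :
    validate_magic_token_format_alt token = true ↔ pvMid token.toList := by
  unfold validate_magic_token_format_alt
  dsimp only
  rw [pvMid_iff_shape]
  rw [PySem.List.slice_to token.toList (show (0:Int) ≤ 64 by omega),
    PySem.List.slice_from token.toList (show (0:Int) ≤ 65 by omega)]
  by_cases h1 : token.toList.length = 129
  · simp [h1, List.all_eq_true, show ((64:Int).toNat) = 64 from rfl,
      show ((65:Int).toNat) = 65 from rfl]
  · have h1' : ¬ token.length = 129 := by simpa using h1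
    simp [h1']

-- ===== VERDICT (by name: the statement is the Claim_ definition above) =====
theorem validate_magic_token_format_spec : Claim_equal_validate_magic_token_format := by
  intro token _
  unfold Spec_validate_magic_token_format
  rw [Bool.eq_iff_iff, A_eq_true_iff, B_eq_true_iff]
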